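-- pv_equiv track=rewrite | github.com/FedasaBote/CompetitiveProgramming | start/codeforces/1809C Sum-on Subarrays.py | solve
-- ===== SOURCE A (Python) =====
-- def solve(n, k):
--     if n == 0:
--         return []
--
--     nums = [-1] * n
--     if k < n:
--         if k > 0:
--             nums[k - 1] = 200
--         nums[k] = -400
--     else:
--         nums = solve(n - 1, k - n)
--         nums.append(1000)
--
--     return nums
-- ===== SOURCE B (Python) =====
-- def solve(n, k):
--     # Iterative peel: strip off trailing 1000-entries instead of recursing.
--     count = 0
--     while n > 0 and k >= n:
--         count += 1
--         k -= n
--         n -= 1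
--     if n == 0:
--         base = []
--     else:
--         base = [-1] * n
--         if k > 0:
--             base[k - 1] = 200
--         base[k] = -400
--     return base + [1000] * count
-- ===== Notes on version B (the rewrite author's own statement) =====
-- stated objective: alternative
-- what changed: Replaces A's recursion (one stack frame per trailing 1000) with an iterative while-loop peel that counts the trailing 1000s and builds the base segment once, then appends the 1000s in one step.
import Mathlib
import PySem

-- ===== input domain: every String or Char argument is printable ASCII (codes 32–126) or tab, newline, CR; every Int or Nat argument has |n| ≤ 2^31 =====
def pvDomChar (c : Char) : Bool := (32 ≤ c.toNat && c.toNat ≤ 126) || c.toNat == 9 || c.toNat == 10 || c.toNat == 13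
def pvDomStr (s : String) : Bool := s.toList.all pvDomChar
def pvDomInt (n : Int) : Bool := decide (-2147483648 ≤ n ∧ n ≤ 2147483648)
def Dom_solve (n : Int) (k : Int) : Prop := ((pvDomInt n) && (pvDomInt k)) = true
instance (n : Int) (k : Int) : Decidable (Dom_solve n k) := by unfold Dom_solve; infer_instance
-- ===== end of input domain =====

-- B replaces A's recursion by an iterative peel of the trailing 1000s; equal return values on Pre_.

-- ===== PORT A =====
-- literal port of A's recursion; the 'n ≤ 0' guard only totalizes the cases
-- where the Python raises (n < 0 diverges / raises, excluded by Pre_solve).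
def solve (n : Int) (k : Int) : List Int :=
  if _h : n ≤ 0 then []
  else
    if k < n then
      let nums := List.replicate n.toNat (-1 : Int)
      let nums := if k > 0 then PySem.List.pySetD nums (k - 1) 200 else nums
      PySem.List.pySetD nums k (-400)
    else
      solve (n - 1) (k - n) ++ [1000]
termination_by n.toNat
decreasing_by omega

-- ===== PORT B =====
-- the while-loop of Source B: state (n, k, count)
def solvePeel (n : Int) (k : Int) (count : Nat) : Int × Int × Nat :=
  if 0 < n ∧ n ≤ k then solvePeel (n - 1) (k - n) (count + 1) else (n, k, count)
termination_by n.toNat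
decreasing_by omega

def solve_alt (n : Int) (k : Int) : List Int :=
  match solvePeel n k 0 with
  | (n', k', count) =>
    let base : List Int :=
      if n' = 0 then []
      else
        let base := List.replicate n'.toNat (-1 : Int)
        let base := if k' > 0 then PySem.List.pySetD base (k' - 1) 200 else base
        PySem.List.pySetD base k' (-400)
    base ++ List.replicate count 1000

-- ===== PRECONDITION & SPEC =====
-- Pre_ excludes exactly the inputs on which the Python A raises: n < 0
-- (unbounded recursion / IndexError) and, for n > 0, k < -n (IndexError on nums[k]).
def Pre_solve (n : Int) (k : Int) : Prop := 0 ≤ n ∧ (n = 0 ∨ -n ≤ k)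
instance (n : Int) (k : Int) : Decidable (Pre_solve n k) := by unfold Pre_solve; infer_instance
def pvWitness_solve : Int × Int := (4, 7)
def Spec_solve (n : Int) (k : Int) (out : List Int) : Prop := out = solve_alt n k
instance (n : Int) (k : Int) (out : List Int) : Decidable (Spec_solve n k out) := by unfold Spec_solve; infer_instance

-- ===== CLAIM =====
def Claim_equal_solve : Prop := ∀ (n : Int) (k : Int), Dom_solve n k → Pre_solve n k → Spec_solve n k (solve n k)

-- ===== LEMMAS AND PROOFS =====

-- the base segment written by both programs, abstracted for the proof
def solveBase (n : Int) (k : Int) : List Int :=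
  if n = 0 then []
  else
    let base := List.replicate n.toNat (-1 : Int)
    let base := if k > 0 then PySem.List.pySetD base (k - 1) 200 else base
    PySem.List.pySetD base k (-400)

lemma solve_alt_eq_peel (n k : Int) :
    solve_alt n k =
      (solveBase (solvePeel n k 0).1 (solvePeel n k 0).2.1) ++
        List.replicate (solvePeel n k 0).2.2 1000 := by
  unfold solve_alt solveBase
  rcases h : solvePeel n k 0 with ⟨n', k', c⟩
  simp

lemma solve_peel_key (n k : Int) (c : Nat) (hn : 0 ≤ n) (hk : n = 0 ∨ -n ≤ k) :
    solve n k ++ List.replicate c 1000 =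
      (solveBase (solvePeel n k c).1 (solvePeel n k c).2.1) ++
        List.replicate (solvePeel n k c).2.2 1000 := by
  by_cases h0 : n = 0
  · subst h0
    rw [solve, solvePeel]
    simp [solveBase]
  · have hpos : 0 < n := lt_of_le_of_ne hn (Ne.symm h0)
    by_cases hkn : k < n
    · rw [solve, solvePeel, dif_neg (by omega : ¬ n ≤ 0), if_pos hkn,
        if_neg (by omega : ¬ (0 < n ∧ n ≤ k))]
      simp [solveBase, h0]
    · rw [solve, solvePeel, dif_neg (by omega : ¬ n ≤ 0), if_neg hkn,
        if_pos (by omega : 0 < n ∧ n ≤ k), List.append_assoc]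
      have hrep : ([1000] : List Int) ++ List.replicate c 1000 = List.replicate (c + 1) 1000 := by
        simp [List.replicate_succ]
      rw [hrep]
      exact solve_peel_key (n - 1) (k - n) (c + 1) (by omega) (by omega)
termination_by n.toNat
decreasing_by omega

-- ===== VERDICT =====
theorem solve_spec : Claim_equal_solve := by
  intro n k _ hpre
  unfold Spec_solve
  have h := solve_peel_key n k 0 hpre.1 hpre.2
  rw [solve_alt_eq_peel, ← h]
  simp
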